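-- pv_equiv track=rewrite | github.com/Quratulain-shah/AI-Employee-FTE | plan_creator.py | identify_risks
-- ===== SOURCE A (Python) =====
-- from typing import Dict, List, Optional, Any, Tuple
--
-- def identify_risks(content: str) -> List[str]:
--     """Identify potential risks in the content"""
--     risk_indicators = [
--         'risk', 'challenge', 'obstacle', 'difficulty', 'concern',
--         'potential issue', 'barrier', 'threat', 'uncertainty'
--     ]
--
--     content_lower = content.lower()
--     risks = []
--     for indicator in risk_indicators:
--         if indicator in content_lower:
--             # Extract the sentence containing the risk
--             sentences = content.split('.')
--             for sentence in sentences: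
--                 if indicator in sentence.lower():
--                     risks.append(sentence.strip())
--
--     return risks
-- ===== SOURCE B (Python) =====
-- from typing import List
--
-- def identify_risks(content: str) -> List[str]:
--     """Identify potential risks in the content"""
--     risk_indicators = [
--         'risk', 'challenge', 'obstacle', 'difficulty', 'concern',
--         'potential issue', 'barrier', 'threat', 'uncertainty'
--     ]
--
--     # One pass over the sentences: bucket each stripped sentence under every
--     # indicator it contains, then emit the buckets in indicator order.
--     buckets = [[] for _ in risk_indicators]
--     for sentence in content.split('.'):
--         low = sentence.lower()
--         stripped = sentence.strip()
--         for i, indicator in enumerate(risk_indicators):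
--             if indicator in low:
--                 buckets[i].append(stripped)
--     return [s for bucket in buckets for s in bucket]
-- ===== Notes on version B (the rewrite author's own statement) =====
-- stated objective: alternative
-- what changed: Instead of re-splitting the content and re-scanning all sentences once per indicator (nine passes, each sentence re-lowercased per pass), B splits once, lowercases and strips each sentence once, and in a single pass over the sentences appends each match to a per-indicator bucket, concatenating the buckets in indicator order at the end; it trades repeated scanning for a bucket index of the same overall cost.
import Mathlib
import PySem

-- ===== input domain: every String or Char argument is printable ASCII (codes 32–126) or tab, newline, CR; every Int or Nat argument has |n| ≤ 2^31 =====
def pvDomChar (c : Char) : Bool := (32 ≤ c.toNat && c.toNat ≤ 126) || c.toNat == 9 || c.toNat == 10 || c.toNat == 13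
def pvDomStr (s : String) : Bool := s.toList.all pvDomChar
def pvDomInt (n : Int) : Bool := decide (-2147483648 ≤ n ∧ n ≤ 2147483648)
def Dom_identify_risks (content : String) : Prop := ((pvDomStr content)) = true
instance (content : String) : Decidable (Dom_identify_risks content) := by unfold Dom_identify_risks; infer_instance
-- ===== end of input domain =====

-- B replaces A's per-indicator re-split and re-scan of all sentences by a single pass over the
-- sentences that buckets each stripped sentence under every indicator it contains (objective: alternative).

-- ===== PORT A =====
def riskIndicators : List String :=
  ["risk", "challenge", "obstacle", "difficulty", "concern",
   "potential issue", "barrier", "threat", "uncertainty"]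

def identify_risks (content : String) : List String :=
  let content_lower := PySem.Str.lower content
  riskIndicators.foldl (fun risks indicator =>
    if PySem.Str.isIn indicator content_lower then
      -- sentences = content.split('.')  ('.' is non-empty, so split? returns some)
      let sentences := (PySem.Str.split? content ".").getD []
      sentences.foldl (fun risks sentence =>
        if PySem.Str.isIn indicator (PySem.Str.lower sentence) then
          risks ++ [PySem.Str.strip sentence]
        else risks) risks
    else risks) []

-- ===== PORT B =====
def identify_risks_alt (content : String) : List String :=
  let sentences := (PySem.Str.split? content ".").getD []
  let buckets0 := riskIndicators.map (fun _ => ([] : List String))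
  let buckets := sentences.foldl (fun bs sentence =>
    let low := PySem.Str.lower sentence
    let stripped := PySem.Str.strip sentence
    List.zipWith (fun indicator b =>
      if PySem.Str.isIn indicator low then b ++ [stripped] else b) riskIndicators bs) buckets0
  buckets.foldl (fun acc b => acc ++ b) []

-- ===== PRECONDITION & SPEC =====
def Spec_identify_risks (content : String) (out : List String) : Prop := out = identify_risks_alt content
instance (content : String) (out : List String) : Decidable (Spec_identify_risks content out) := by unfold Spec_identify_risks; infer_instance

-- ===== CLAIM (what is proved, stated in full; the proofs are below) =====
def Claim_equal_identify_risks : Prop := ∀ (content : String), Dom_identify_risks content → Spec_identify_risks content (identify_risks content)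

-- ===== LEMMAS AND PROOFS =====

-- the matching stripped sentences for one indicator, in source order
def pvG (sentences : List String) (indicator : String) : List String :=
  (sentences.filter (fun s => PySem.Str.isIn indicator (PySem.Str.lower s))).map PySem.Str.strip

-- every piece produced by splitOn.go is an old accumulator entry or an infix of cur.reverse ++ l
theorem pv_go_infix (sep : List Char) : ∀ (fuel : ℕ) (l cur : List Char) (acc : List (List Char)),
    ∀ p ∈ PySem.Chars.splitOn.go sep fuel l cur acc, p ∈ acc ∨ p <:+: (cur.reverse ++ l) := by
  intro fuel
  induction fuel with
  | zero =>
    intro l cur acc p hp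
    simp only [PySem.Chars.splitOn.go, List.mem_reverse, List.mem_cons] at hp
    rcases hp with h | h
    · exact Or.inr (h ▸ List.infix_rfl)
    · exact Or.inl h
  | succ fuel ih =>
    intro l cur acc p hp
    cases l with
    | nil =>
      simp only [PySem.Chars.splitOn.go, List.mem_reverse, List.mem_cons] at hp
      rcases hp with h | h
      · subst h; exact Or.inr (by simp)
      · exact Or.inl h
    | cons c rest =>
      simp only [PySem.Chars.splitOn.go] at hp
      by_cases hpre : sep.isPrefixOf (c :: rest) = true
      · rw [if_pos hpre] at hp
        rcases ih _ _ _ _ hp with h | h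
        · rcases List.mem_cons.mp h with h' | h'
          · exact Or.inr (h' ▸ ((List.prefix_append cur.reverse (c :: rest)).isInfix))
          · exact Or.inl h'
        · refine Or.inr (h.trans ?_)
          simp only [List.reverse_nil, List.nil_append]
          exact ((List.drop_suffix sep.length (c :: rest)).isInfix).trans
            ((List.suffix_append cur.reverse (c :: rest)).isInfix)
      · rw [if_neg hpre] at hp
        rcases ih _ _ _ _ hp with h | h
        · exact Or.inl h
        · refine Or.inr ?_
          have : (c :: cur).reverse ++ rest = cur.reverse ++ (c :: rest) := by simp
          exact this ▸ h

theorem pv_mem_splitOn_infix {s p : List Char} (sep : List Char)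
    (hp : p ∈ PySem.Chars.splitOn s sep) : p <:+: s := by
  have := pv_go_infix sep (s.length + 1) s [] [] p
  simp only [PySem.Chars.splitOn] at hp
  rcases this hp with h | h
  · exact absurd h (List.not_mem_nil)
  · simpa using h

-- zipWith over the same index list twice fuses
theorem pv_zipWith_zipWith {α β : Type} (f g : α → β → β) :
    ∀ (inds : List α) (bs : List β),
    List.zipWith g inds (List.zipWith f inds bs) = List.zipWith (fun a b => g a (f a b)) inds bs := by
  intro inds
  induction inds with
  | nil => intro bs; simp
  | cons i is ih =>
    intro bs
    cases bs with
    | nil => simp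
    | cons b bs => simp; exact ih bs

theorem pv_zipWith_id {α β : Type} : ∀ (inds : List α) (bs : List β),
    bs.length = inds.length → List.zipWith (fun _ b => b) inds bs = bs := by
  intro inds
  induction inds with
  | nil => intro bs h; simp at h; simp [h]
  | cons i is ih =>
    intro bs h
    cases bs with
    | nil => simp at h
    | cons b bs => simp at h; simpa using ih bs h

theorem pv_zipWith_self {α β : Type} (f : α → α → β) : ∀ (l : List α),
    List.zipWith f l l = l.map (fun a => f a a) := by
  intro l; induction l with
  | nil => rfl
  | cons a l ih => simp [ih]

-- the bucket-filling loop of B, characterised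
theorem pv_B_loop (inds : List String) : ∀ (sents : List String) (bs : List (List String)),
    bs.length = inds.length →
    sents.foldl (fun bs sentence =>
        List.zipWith (fun indicator b =>
          if PySem.Str.isIn indicator (PySem.Str.lower sentence) then
            b ++ [PySem.Str.strip sentence] else b) inds bs) bs
      = List.zipWith (fun indicator b => b ++ pvG sents indicator) inds bs := by
  intro sents
  induction sents with
  | nil =>
    intro bs h
    simp only [List.foldl_nil, pvG, List.filter_nil, List.map_nil, List.append_nil]
    exact (pv_zipWith_id inds bs h).symm
  | cons s ss ih =>
    intro bs h
    rw [List.foldl_cons]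
    rw [ih _ (by rw [List.length_zipWith, h, Nat.min_self])]
    rw [pv_zipWith_zipWith]
    have : (fun (indicator : String) (b : List String) =>
        (if PySem.Str.isIn indicator (PySem.Str.lower s) then
          b ++ [PySem.Str.strip s] else b) ++ pvG ss indicator)
        = (fun indicator b => b ++ pvG (s :: ss) indicator) := by
      funext indicator b
      simp only [pvG, List.filter_cons]
      by_cases hin : PySem.Str.isIn indicator (PySem.Str.lower s) = true <;>
        rw [PySem.Str.isIn_eq, PySem.Str.toList_lower] at hin
      · simp [hin, List.append_assoc]
      · simp [hin]
    rw [this]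

-- if the indicator is not in the lowered content, it is in no lowered sentence
theorem pv_guard_false {content ind s : String}
    (hs : s.toList ∈ PySem.Chars.splitOn content.toList (String.toList "."))
    (hg : PySem.Str.isIn ind (PySem.Str.lower content) = false) :
    PySem.Str.isIn ind (PySem.Str.lower s) = false := by
  rw [PySem.Str.isIn_eq, PySem.Str.toList_lower] at hg ⊢
  rw [PySem.Chars.isIn_eq_false_iff] at hg ⊢
  intro hin
  apply hg
  have hinf : s.toList <:+: content.toList := pv_mem_splitOn_infix _ hs
  have := hinf.map PySem.Chars.lowerChar
  simp only [PySem.Chars.lower] at hin ⊢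
  exact hin.trans this

-- the sentences of A and B, with their relation to Chars.splitOn
theorem pv_sentences (content : String) :
    ∃ sentences : List String,
      PySem.Str.split? content "." = some sentences ∧
      sentences.map String.toList = PySem.Chars.splitOn content.toList (String.toList ".") := by
  have h := PySem.Str.split?_map content "."
  cases hsp : PySem.Str.split? content "." with
  | none =>
    rw [hsp] at h
    simp only [Option.map_none] at h
    have : PySem.Chars.split? content.toList (String.toList ".") = none := h.symm
    simp [PySem.Chars.split?] at this
  | some xs =>
    rw [hsp] at h
    simp only [Option.map_some] at h
    refine ⟨xs, rfl, ?_⟩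
    have : PySem.Chars.split? content.toList (String.toList ".") =
        some (PySem.Chars.splitOn content.toList (String.toList ".")) := by
      simp [PySem.Chars.split?]
    rw [this] at h
    exact Option.some.inj h

theorem pv_foldl_congr {α β : Type} {f g : β → α → β} {l : List α} {init : β}
    (h : ∀ b a, a ∈ l → f b a = g b a) : l.foldl f init = l.foldl g init := by
  induction l generalizing init with
  | nil => rfl
  | cons a l ih =>
    rw [List.foldl_cons, List.foldl_cons, h init a (List.mem_cons_self ..)]
    exact ih (fun b a' ha' => h b a' (List.mem_cons_of_mem _ ha'))

-- inner loop of A collects the matching stripped sentences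
theorem pv_A_inner (ind : String) : ∀ (sents : List String) (risks : List String),
    sents.foldl (fun risks sentence =>
      if PySem.Str.isIn ind (PySem.Str.lower sentence) then
        risks ++ [PySem.Str.strip sentence] else risks) risks
    = risks ++ pvG sents ind := by
  intro sents
  induction sents with
  | nil => intro risks; simp [pvG]
  | cons s ss ih =>
    intro risks
    rw [List.foldl_cons]
    by_cases hin : PySem.Str.isIn ind (PySem.Str.lower s) = true
    · rw [if_pos hin, ih]
      rw [PySem.Str.isIn_eq, PySem.Str.toList_lower] at hin
      simp [pvG, hin, List.append_assoc]
    · rw [if_neg hin, ih]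
      rw [PySem.Str.isIn_eq, PySem.Str.toList_lower] at hin
      simp [pvG, hin]

-- ===== VERDICT (by name: the statement is the Claim_ definition above) =====
theorem identify_risks_spec : Claim_equal_identify_risks := by
  intro content _hdom
  show identify_risks content = identify_risks_alt content
  obtain ⟨sentences, hsp, hmap⟩ := pv_sentences content
  -- B side
  have hB : identify_risks_alt content
      = (riskIndicators.map (fun ind => pvG sentences ind)).foldl (fun acc b => acc ++ b) [] := by
    unfold identify_risks_alt
    rw [hsp]
    simp only [Option.getD_some]
    rw [pv_B_loop riskIndicators sentences _ (by simp)]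
    rw [List.zipWith_map_right, pv_zipWith_self]
    simp
  -- A side
  have hA : identify_risks content
      = riskIndicators.foldl (fun risks ind => risks ++ pvG sentences ind) [] := by
    unfold identify_risks
    rw [hsp]
    simp only [Option.getD_some]
    apply pv_foldl_congr
    intro risks ind _hmem
    by_cases hg : PySem.Str.isIn ind (PySem.Str.lower content) = true
    · rw [if_pos hg, pv_A_inner]
    · rw [if_neg hg]
      have hempty : pvG sentences ind = [] := by
        unfold pvG
        rw [List.map_eq_nil_iff, List.filter_eq_nil_iff]
        intro s hsmem
        have : s.toList ∈ PySem.Chars.splitOn content.toList (String.toList ".") := by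
          rw [← hmap]; exact List.mem_map_of_mem hsmem
        have hf := pv_guard_false this (eq_false_of_ne_true hg)
        rw [PySem.Str.isIn_eq, PySem.Str.toList_lower] at hf
        simp [hf]
      rw [hempty, List.append_nil]
  rw [hA, hB, List.foldl_map]
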